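-- pv_equiv track=rewrite | github.com/AbdullahKarakoc/Python-Projects | Projeler/test.py | is_sparse
-- ===== SOURCE A (Python) =====
-- def is_sparse(num):
--     prev_bit = 0
--     while num > 0:
--         current_bit = num & 1
--         if prev_bit == 1 and current_bit == 1:
--             return False
--         prev_bit = current_bit
--         num >>= 1
--     return True
-- ===== SOURCE B (Python) =====
-- def is_sparse(num):
--     return num <= 0 or (num & (num >> 1)) == 0
-- ===== Notes on version B (the rewrite author's own statement) =====
-- stated objective: simpler
-- what changed: Replaced the bit-by-bit while loop that tracks the previous bit with a single bitwise AND of the number against its own one-bit right shift, guarded for non-positive inputs exactly as A behaves there.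
import Mathlib
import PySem

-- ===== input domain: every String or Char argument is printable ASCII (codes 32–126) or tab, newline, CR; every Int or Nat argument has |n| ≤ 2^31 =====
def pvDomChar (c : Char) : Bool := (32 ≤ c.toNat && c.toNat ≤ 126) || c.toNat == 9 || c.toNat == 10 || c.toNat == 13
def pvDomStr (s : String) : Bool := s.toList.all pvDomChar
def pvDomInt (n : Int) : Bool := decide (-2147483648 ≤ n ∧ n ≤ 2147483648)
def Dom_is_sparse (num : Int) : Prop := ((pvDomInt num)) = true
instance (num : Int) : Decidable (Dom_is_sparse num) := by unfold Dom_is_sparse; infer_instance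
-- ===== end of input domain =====

-- B replaces A's bit-scanning loop with a single bitwise AND of the number with its own one-bit shift; non-positive inputs return true exactly as in A (simpler).

-- ===== PORT A =====
-- A's while loop: scan bits LSB-first, tracking the previous bit.
def is_sparse_loop (num : Int) (prev_bit : Int) : Bool :=
  if 0 < num then
    let current_bit := Int.land num 1
    if prev_bit == 1 && current_bit == 1 then false
    else is_sparse_loop (Int.shiftRight num 1) current_bit
  else true
termination_by num.toNat
decreasing_by
  have h : Int.shiftRight num 1 = num / 2 := by
    simpa using Int.shiftRight_eq_div_pow num 1
  rw [h]; omega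

def is_sparse (num : Int) : Bool := is_sparse_loop num 0

-- ===== PORT B =====
def is_sparse_alt (num : Int) : Bool :=
  num ≤ 0 || (Int.land num (Int.shiftRight num 1) == 0)

-- ===== PRECONDITION & SPEC =====
def Spec_is_sparse (num : Int) (out : Bool) : Prop := out = is_sparse_alt num
instance (num : Int) (out : Bool) : Decidable (Spec_is_sparse num out) := by unfold Spec_is_sparse; infer_instance

-- ===== CLAIM (what is proved, stated in full; the proofs are below) =====
def Claim_equal_is_sparse : Prop := ∀ (num : Int), Dom_is_sparse num → Spec_is_sparse num (is_sparse num)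

-- ===== LEMMAS AND PROOFS =====

theorem land_cast (m n : Nat) : Int.land (m:Int) (n:Int) = ((m &&& n : Nat) : Int) := by
  simp [Int.land]

theorem land_one_cast (n : Nat) : Int.land (n:Int) 1 = ((n &&& 1 : Nat) : Int) := by
  simpa using land_cast n 1

theorem shiftRight_one_cast (n : Nat) : Int.shiftRight (n:Int) 1 = ((n >>> 1 : Nat) : Int) := by
  simp [Int.shiftRight]

theorem land_eq_zero_iff (m k : Nat) :
    m &&& k = 0 ↔ ∀ i, ¬(m.testBit i = true ∧ k.testBit i = true) := by
  constructor
  · intro h i ⟨h1, h2⟩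
    have := congrArg (fun x => Nat.testBit x i) h
    simp [h1, h2, Nat.zero_testBit] at this
  · intro h
    apply Nat.eq_of_testBit_eq
    intro i
    have := h i
    simp only [Nat.testBit_land, Nat.zero_testBit]
    rcases Bool.eq_false_or_eq_true (m.testBit i) with h1 | h1 <;>
      rcases Bool.eq_false_or_eq_true (k.testBit i) with h2 | h2 <;>
      simp_all

theorem testBit_shift1 (n i : Nat) : (n >>> 1).testBit i = n.testBit (1 + i) :=
  Nat.testBit_shiftRight n

theorem land1_eq_one_iff (n : Nat) : n &&& 1 = 1 ↔ n.testBit 0 = true := by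
  rw [Nat.and_one_is_mod, Nat.testBit_zero]
  simp

-- the heart of the equivalence: peeling one bit off the sparse test
theorem sparse_step (n : Nat) :
    n &&& (n >>> 1) = 0 ↔
      (¬(n &&& 1 = 1 ∧ (n >>> 1) &&& 1 = 1) ∧ (n >>> 1) &&& ((n >>> 1) >>> 1) = 0) := by
  rw [land_eq_zero_iff, land_eq_zero_iff, land1_eq_one_iff, land1_eq_one_iff]
  simp only [testBit_shift1]
  constructor
  · intro h
    refine ⟨h 0, fun i hi => h (1 + i) ?_⟩
    obtain ⟨a, b⟩ := hi
    refine ⟨a, ?_⟩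
    have : 1 + (1 + i) = 1 + i + 1 := by omega
    rw [this]
    simpa [Nat.add_comm] using b
  · rintro ⟨h0, h⟩ i ⟨a, b⟩
    cases i with
    | zero => exact h0 ⟨a, by simpa using b⟩
    | succ j =>
      refine h j ⟨by simpa [Nat.add_comm] using a, ?_⟩
      have : 1 + (j + 1) = 1 + (1 + j) := by omega
      rw [this] at b
      simpa [Nat.add_comm] using b

theorem loop_eq (n : Nat) (prev : Int) :
    is_sparse_loop (n : Int) prev
      = (!(prev == 1 && ((n &&& 1 : Nat) == 1)) && decide (n &&& (n >>> 1) = 0)) := by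
  induction n using Nat.strong_induction_on generalizing prev with
  | _ n ih =>
    by_cases hn : 0 < n
    · have hpos : (0 : Int) < (n : Int) := by exact_mod_cast hn
      rw [is_sparse_loop, if_pos hpos]
      simp only [land_one_cast, shiftRight_one_cast]
      have hlt : n >>> 1 < n := by
        simpa [Nat.shiftRight_succ, Nat.shiftRight_zero] using Nat.div_lt_self hn (by norm_num)
      by_cases hb : (prev == 1 && (((n &&& 1 : Nat) : Int) == 1)) = true
      · rw [if_pos hb]
        simp only [Bool.and_eq_true, beq_iff_eq] at hb
        obtain ⟨hp, hc⟩ := hb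
        have hc' : (n &&& 1) = 1 := by exact_mod_cast hc
        simp [hp, hc']
      · rw [if_neg hb, ih _ hlt]
        simp only [Bool.and_eq_true, beq_iff_eq, not_and] at hb
        rw [Bool.eq_iff_iff]
        simp only [Bool.and_eq_true, Bool.not_eq_true', Bool.and_eq_false_iff,
          beq_eq_false_iff_ne, ne_eq, decide_eq_true_iff, Nat.cast_eq_one]
        rw [sparse_step n]
        tauto
    · have h0 : n = 0 := by omega
      subst h0
      rw [is_sparse_loop.eq_def]
      simp

-- ===== VERDICT (by name: the statement is the Claim_ definition above) =====
theorem is_sparse_spec : Claim_equal_is_sparse := by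
  intro num _
  unfold Spec_is_sparse is_sparse is_sparse_alt
  by_cases h : num ≤ 0
  · rw [is_sparse_loop.eq_def]
    simp [h, not_lt.mpr h]
  · rw [not_le] at h
    obtain ⟨m, rfl⟩ : ∃ m : Nat, num = (m : Int) := ⟨num.toNat, (Int.toNat_of_nonneg h.le).symm⟩
    rw [loop_eq, shiftRight_one_cast, land_cast]
    have hm : m ≠ 0 := by exact_mod_cast h.ne'
    rw [Bool.eq_iff_iff]
    simp [hm]
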